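-- pv_equiv track=rewrite | github.com/TLindenIII/brainalign_ext_meg_fmri | src/data/image_manifest.py | build_intersection_map
-- ===== SOURCE A (Python) =====
-- def build_intersection_map(named_sets):
--     intersections = {}
--     modalities = sorted(named_sets)
--     for size in range(2, len(modalities) + 1):
--         for combo in _combinations(modalities, size):
--             combo_name = "_".join(combo)
--             shared = set.intersection(*(named_sets[name] for name in combo))
--             intersections[combo_name] = sorted(shared)
--     return intersections
--
-- def _combinations(values, size):
--     if size == 0:
--         yield ()
--         return
--     if len(values) < size:
--         return
--     if size == 1:
--         for value in values:
--             yield (value,)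
--         return
--
--     for idx, value in enumerate(values):
--         for tail in _combinations(values[idx + 1 :], size - 1):
--             yield (value,) + tail
-- ===== SOURCE B (Python) =====
-- def build_intersection_map(named_sets):
--     # Memoized level-by-level DP: each size-k combo's intersection is built by
--     # intersecting its size-(k-1) parent's already-computed intersection with one more set.
--     keys = sorted(named_sets)
--     result = {}
--     level = [([key], named_sets[key], keys[i + 1:]) for i, key in enumerate(keys)]
--     for _size in range(2, len(keys) + 1):
--         nxt = []
--         for combo, inter, rest in level:
--             for j, key in enumerate(rest):
--                 nxt.append((combo + [key], inter & named_sets[key], rest[j + 1:]))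
--         for combo, inter, _rest in nxt:
--             result["_".join(combo)] = sorted(inter)
--         level = nxt
--     return result
-- ===== Notes on version B (the rewrite author's own statement) =====
-- stated objective: faster
-- what changed: Instead of re-intersecting all k member sets from scratch for every combination (regenerating combinations recursively with list slicing each time), B builds combinations level by level, memoizing each combo's intersection and obtaining a size-k combo's intersection by one intersection of its size-(k-1) parent's stored result with one more set.
import Mathlib
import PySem

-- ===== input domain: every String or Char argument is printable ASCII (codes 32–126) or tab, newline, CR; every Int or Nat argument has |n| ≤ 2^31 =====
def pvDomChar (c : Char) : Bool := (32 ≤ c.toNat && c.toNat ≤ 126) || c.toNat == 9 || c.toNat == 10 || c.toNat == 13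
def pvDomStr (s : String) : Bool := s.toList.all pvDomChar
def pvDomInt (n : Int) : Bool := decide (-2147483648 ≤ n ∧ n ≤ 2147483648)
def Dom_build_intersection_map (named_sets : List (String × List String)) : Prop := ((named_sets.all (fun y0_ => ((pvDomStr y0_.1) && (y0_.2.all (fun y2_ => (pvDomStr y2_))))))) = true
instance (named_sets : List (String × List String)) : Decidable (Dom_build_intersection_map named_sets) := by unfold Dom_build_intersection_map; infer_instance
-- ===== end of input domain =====

-- B memoizes each combination's intersection and extends it by one set per new member,
-- instead of A's from-scratch intersection of all k member sets for every combination (objective: faster).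
-- named_sets is a dict name -> set of strings: lookup is first-match on the association list,
-- and the value lists hold the distinct set elements.

-- ===== PORT A =====
-- named_sets[name]  (name is always a key, so the default [] branch is never taken)
def bimGet (named_sets : List (String × List String)) (name : String) : List String :=
  ((named_sets.find? (fun p => p.1 == name)).map Prod.snd).getD []

-- the generator _combinations(values, size), as the list it yields, recursing on size
def combosA : Nat → List String → List (List String)
  | 0, _ => [[]]
  | Nat.succ s, values =>
    if values.length < Nat.succ s then []
    else if s = 0 then values.map (fun v => [v])
    else
      (PySem.List.enumerate values 0).flatMap (fun p =>
        (combosA s (PySem.List.slice values (some (p.1 + 1)) none)).map (fun tail => p.2 :: tail))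

def build_intersection_map (named_sets : List (String × List String)) : List (String × List String) :=
  let modalities := PySem.List.sorted (named_sets.map Prod.fst) (fun s => s) false
  ((PySem.List.pyRange 2 ((modalities.length : Int) + 1) 1).foldl (fun intersections (size : Int) =>
      (combosA size.toNat modalities).foldl (fun intersections combo =>
        let combo_name := PySem.Str.join "_" combo
        -- set.intersection(*(named_sets[name] for name in combo)); combo is nonempty (size ≥ 2)
        let shared : List String :=
          match combo with
          | [] => []
          | c :: cs => cs.foldl (fun acc n => PySem.Set.inter acc (bimGet named_sets n)) (bimGet named_sets c)
        PySem.Dict.insert intersections combo_name (PySem.List.sorted shared (fun x => x) false))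
      intersections)
    (PySem.Dict.empty : PySem.Dict String (List String))).items

-- ===== PORT B =====
-- inner loop 'for j, key in enumerate(rest): nxt.append((combo + [key], inter & named_sets[key], rest[j+1:]))'
def bimExpand (named_sets : List (String × List String)) (combo inter : List String) :
    List String → List (List String × List String × List String)
  | [] => []
  | key :: rs =>
    (combo ++ [key], PySem.Set.inter inter (bimGet named_sets key), rs) :: bimExpand named_sets combo inter rs

-- '[([key], named_sets[key], keys[i+1:]) for i, key in enumerate(keys)]'
def bimInit (named_sets : List (String × List String)) :
    List String → List (List String × List String × List String)
  | [] => []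
  | key :: rs => ([key], bimGet named_sets key, rs) :: bimInit named_sets rs

def build_intersection_map_alt (named_sets : List (String × List String)) : List (String × List String) :=
  let keys := PySem.List.sorted (named_sets.map Prod.fst) (fun s => s) false
  ((PySem.List.pyRange 2 ((keys.length : Int) + 1) 1).foldl
    (fun (st : PySem.Dict String (List String) × List (List String × List String × List String)) _size =>
      let nxt := st.2.flatMap (fun e => bimExpand named_sets e.1 e.2.1 e.2.2)
      let result := nxt.foldl (fun r e =>
        PySem.Dict.insert r (PySem.Str.join "_" e.1) (PySem.List.sorted e.2.1 (fun x => x) false)) st.1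
      (result, nxt))
    ((PySem.Dict.empty : PySem.Dict String (List String)), bimInit named_sets keys)).1.items

-- ===== PRECONDITION & SPEC =====
def Spec_build_intersection_map (named_sets : List (String × List String)) (out : List (String × List String)) : Prop := out = build_intersection_map_alt named_sets
instance (named_sets : List (String × List String)) (out : List (String × List String)) : Decidable (Spec_build_intersection_map named_sets out) := by unfold Spec_build_intersection_map; infer_instance

-- ===== CLAIM (what is proved, stated in full; the proofs are below) =====
def Claim_equal_build_intersection_map : Prop := ∀ (named_sets : List (String × List String)), Dom_build_intersection_map named_sets → Spec_build_intersection_map named_sets (build_intersection_map named_sets)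

-- ===== LEMMAS AND PROOFS =====

-- A's per-combo value: the left fold of set intersection over the combo's sets
def bimInter (named_sets : List (String × List String)) : List String → List String
  | [] => []
  | c :: cs => cs.foldl (fun acc n => PySem.Set.inter acc (bimGet named_sets n)) (bimGet named_sets c)

-- B's level k (combos of size k+1)
def bimLvl (named_sets : List (String × List String)) (keys : List String) :
    Nat → List (List String × List String × List String)
  | 0 => bimInit named_sets keys
  | k + 1 => (bimLvl named_sets keys k).flatMap (fun e => bimExpand named_sets e.1 e.2.1 e.2.2)

-- (combo, rest) shadows of bimExpand / bimInit / bimLvl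
def bimExpandP (c : List String) : List String → List (List String × List String)
  | [] => []
  | key :: rs => (c ++ [key], rs) :: bimExpandP c rs

def bimSufP : List String → List (List String × List String)
  | [] => []
  | key :: rs => ([key], rs) :: bimSufP rs

def bimPL (keys : List String) : Nat → List (List String × List String)
  | 0 => bimSufP keys
  | k + 1 => (bimPL keys k).flatMap (fun p => bimExpandP p.1 p.2)

-- 'for each suffix v :: rest of keys, emit f v rest'
def bimOverSuf {α : Type} (f : String → List String → List α) : List String → List α
  | [] => []
  | v :: rest => f v rest ++ bimOverSuf f rest

theorem bimOverSuf_congr {α : Type} {f g : String → List String → List α}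
    (h : ∀ v r, f v r = g v r) : ∀ keys, bimOverSuf f keys = bimOverSuf g keys := by
  intro keys; induction keys with
  | nil => rfl
  | cons v rest ih => simp [bimOverSuf, h, ih]

theorem bimOverSuf_flatMap {α β : Type} (f : String → List String → List α) (g : α → List β) :
    ∀ keys, (bimOverSuf f keys).flatMap g = bimOverSuf (fun v r => (f v r).flatMap g) keys := by
  intro keys; induction keys with
  | nil => rfl
  | cons v rest ih => simp [bimOverSuf, ih]

theorem bimOverSuf_map {α β : Type} (f : String → List String → List α) (g : α → β) :
    ∀ keys, (bimOverSuf f keys).map g = bimOverSuf (fun v r => (f v r).map g) keys := by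
  intro keys; induction keys with
  | nil => rfl
  | cons v rest ih => simp [bimOverSuf, ih]

theorem bimOverSuf_nil {α : Type} (f : String → List String → List α) :
    ∀ keys, (∀ v (r : List String), r.length < keys.length → f v r = []) →
      bimOverSuf f keys = [] := by
  intro keys; induction keys with
  | nil => intro _; rfl
  | cons v rest ih =>
    intro h
    simp [bimOverSuf, h v rest (by simp), ih (fun w r hr => h w r (by simp; omega))]

theorem bimExpandP_nilc : ∀ rest, bimExpandP [] rest = bimSufP rest := by
  intro rest; induction rest with
  | nil => rfl
  | cons k rs ih => simp [bimExpandP, bimSufP, ih]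

theorem bimExpandP_prepend (v : String) (c : List String) :
    ∀ (rest : List String),
      bimExpandP (v :: c) rest = (bimExpandP c rest).map (fun p => (v :: p.1, p.2)) := by
  intro rest; induction rest with
  | nil => rfl
  | cons k rs ih => simp [bimExpandP, ih]

theorem bimPL_head : ∀ (k : Nat) (keys : List String),
    bimPL keys (k + 1) =
      bimOverSuf (fun v rest => (bimPL rest k).map (fun p => (v :: p.1, p.2))) keys := by
  intro k
  induction k with
  | zero =>
    intro keys; induction keys with
    | nil => rfl
    | cons v rest ih =>
      show (bimSufP (v :: rest)).flatMap (fun p => bimExpandP p.1 p.2) = _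
      simp only [bimSufP, List.flatMap_cons, bimOverSuf]
      have ih' : (bimSufP rest).flatMap (fun p => bimExpandP p.1 p.2) =
          bimOverSuf (fun v rest => (bimPL rest 0).map (fun p => (v :: p.1, p.2))) rest := ih
      rw [ih']
      congr 1
      rw [show ([v] : List String) = v :: [] from rfl, bimExpandP_prepend, bimExpandP_nilc]
      rfl
  | succ k ihk =>
    intro keys
    show (bimPL keys (k + 1)).flatMap (fun p => bimExpandP p.1 p.2) = _
    rw [ihk keys, bimOverSuf_flatMap]
    refine bimOverSuf_congr (fun v r => ?_) keys
    rw [List.flatMap_map]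
    calc (bimPL r k).flatMap ((fun p => bimExpandP p.1 p.2) ∘ fun p => (v :: p.1, p.2))
        = (bimPL r k).flatMap (fun p => (bimExpandP p.1 p.2).map (fun q => (v :: q.1, q.2))) := by
          refine List.flatMap_congr (fun p _ => ?_)
          exact bimExpandP_prepend v p.1 p.2
      _ = ((bimPL r k).flatMap (fun p => bimExpandP p.1 p.2)).map (fun q => (v :: q.1, q.2)) := by
          rw [List.map_flatMap]
      _ = (bimPL r (k + 1)).map (fun q => (v :: q.1, q.2)) := rfl

theorem combosA_short : ∀ (s : Nat) (values : List String),
    values.length < s → combosA s values = [] := by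
  intro s values h
  cases s with
  | zero => omega
  | succ t => simp [combosA, h]

-- the enumerate/slice loop of _combinations is the suffix recursion
theorem bim_enum_overSuf {α : Type} (g : String → List String → List α) :
    ∀ (values pre : List String),
      (PySem.List.enumerate values (pre.length : Int)).flatMap
        (fun p => g p.2 (PySem.List.slice (pre ++ values) (some (p.1 + 1)) none)) =
      bimOverSuf g values := by
  intro values
  induction values with
  | nil => intro pre; simp [PySem.List.enumerate_nil, bimOverSuf]
  | cons v rest ih =>
    intro pre
    rw [PySem.List.enumerate_cons, List.flatMap_cons, bimOverSuf]
    congr 1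
    · rw [PySem.List.slice_from _ (by positivity)]
      rw [show (((pre.length : Int)) + 1).toNat = (pre ++ [v]).length by simp only [List.length_append, List.length_cons, List.length_nil]; omega]
      rw [show pre ++ v :: rest = (pre ++ [v]) ++ rest by simp]
      rw [List.drop_left]
    · have := ih (pre ++ [v])
      rw [show ((pre ++ [v]).length : Int) = (pre.length : Int) + 1 by simp] at this
      rw [show (pre ++ [v]) ++ rest = pre ++ v :: rest by simp] at this
      exact this

theorem combosA_one (values : List String) :
    combosA 1 values = values.map (fun v => [v]) := by
  cases values with
  | nil => rfl
  | cons v rest => simp [combosA]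

theorem combosA_succ_succ (k : Nat) (values : List String) :
    combosA (k + 2) values =
      bimOverSuf (fun v rest => (combosA (k + 1) rest).map (fun t => v :: t)) values := by
  show (if values.length < k + 2 then [] else _) = _
  by_cases h : values.length < k + 2
  · rw [if_pos h]
    refine (bimOverSuf_nil _ values (fun v r hr => ?_)).symm
    rw [combosA_short (k + 1) r (by omega)]; rfl
  · rw [if_neg h]
    simp only [if_neg (Nat.succ_ne_zero k)]
    have := bim_enum_overSuf (fun v rest => (combosA (k + 1) rest).map (fun t => v :: t)) values []
    simpa using this

-- the (combo, rest) shadow of bimExpand / bimInit / bimLvl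
theorem bimExpand_proj (named_sets : List (String × List String)) (c i : List String) :
    ∀ rest, (bimExpand named_sets c i rest).map (fun e => (e.1, e.2.2)) = bimExpandP c rest := by
  intro rest; induction rest with
  | nil => rfl
  | cons key rs ih => simp [bimExpand, bimExpandP, ih]

theorem bimInit_proj (named_sets : List (String × List String)) :
    ∀ keys, (bimInit named_sets keys).map (fun e => (e.1, e.2.2)) = bimSufP keys := by
  intro keys; induction keys with
  | nil => rfl
  | cons key rs ih => simp [bimInit, bimSufP, ih]

theorem bimLvl_proj (named_sets : List (String × List String)) (keys : List String) :
    ∀ k, (bimLvl named_sets keys k).map (fun e => (e.1, e.2.2)) = bimPL keys k := by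
  intro k; induction k with
  | zero => exact bimInit_proj named_sets keys
  | succ k ih =>
    show ((bimLvl named_sets keys k).flatMap _).map _ =
      (bimPL keys k).flatMap (fun p => bimExpandP p.1 p.2)
    rw [List.map_flatMap, ← ih, List.flatMap_map]
    refine List.flatMap_congr (fun e _ => ?_)
    exact bimExpand_proj named_sets e.1 e.2.1 e.2.2

theorem bimPL_fst : ∀ (k : Nat) (keys : List String),
    (bimPL keys k).map (fun p => p.1) = combosA (k + 1) keys := by
  intro k
  induction k with
  | zero =>
    intro keys
    rw [combosA_one]
    induction keys with
    | nil => rfl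
    | cons v rest ih => simp [bimPL, bimSufP] at ih ⊢; exact ih
  | succ k ihk =>
    intro keys
    rw [bimPL_head, bimOverSuf_map, combosA_succ_succ]
    refine bimOverSuf_congr (fun v r => ?_) keys
    rw [List.map_map, ← ihk r, List.map_map]
    rfl

theorem bimExpand_mem (named_sets : List (String × List String)) (c i : List String) :
    ∀ rest e, e ∈ bimExpand named_sets c i rest →
      ∃ key rs, e = (c ++ [key], PySem.Set.inter i (bimGet named_sets key), rs) := by
  intro rest; induction rest with
  | nil => intro e h; simp [bimExpand] at h
  | cons key rs ih =>
    intro e h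
    rcases (List.mem_cons.mp h) with h | h
    · exact ⟨key, rs, h⟩
    · exact ih e h

theorem bimInit_mem (named_sets : List (String × List String)) :
    ∀ keys e, e ∈ bimInit named_sets keys →
      ∃ key rs, e = ([key], bimGet named_sets key, rs) := by
  intro keys; induction keys with
  | nil => intro e h; simp [bimInit] at h
  | cons key rs ih =>
    intro e h
    rcases (List.mem_cons.mp h) with h | h
    · exact ⟨key, rs, h⟩
    · exact ih e h

theorem bimLvl_inter (named_sets : List (String × List String)) (keys : List String) :
    ∀ k e, e ∈ bimLvl named_sets keys k →
      e.1 ≠ [] ∧ e.2.1 = bimInter named_sets e.1 := by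
  intro k
  induction k with
  | zero =>
    intro e h
    obtain ⟨key, rs, rfl⟩ := bimInit_mem named_sets keys e h
    exact ⟨by simp, rfl⟩
  | succ k ih =>
    intro e h
    rw [bimLvl, List.mem_flatMap] at h
    obtain ⟨e₀, h₀, he⟩ := h
    obtain ⟨hne, hi⟩ := ih e₀ h₀
    obtain ⟨key, rs, rfl⟩ := bimExpand_mem named_sets e₀.1 e₀.2.1 e₀.2.2 _ he
    refine ⟨by simp, ?_⟩
    obtain ⟨c, cs, hc⟩ : ∃ c cs, e₀.1 = c :: cs := by
      cases hval : e₀.1 with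
      | nil => exact absurd hval hne
      | cons c cs => exact ⟨c, cs, rfl⟩
    show PySem.Set.inter e₀.2.1 _ = bimInter named_sets (e₀.1 ++ [key])
    rw [hi, hc, show ((c :: cs) ++ [key]) = c :: (cs ++ [key]) from rfl]
    show PySem.Set.inter
        (cs.foldl (fun acc n => PySem.Set.inter acc (bimGet named_sets n)) (bimGet named_sets c)) _ =
      (cs ++ [key]).foldl (fun acc n => PySem.Set.inter acc (bimGet named_sets n)) (bimGet named_sets c)
    rw [List.foldl_append]
    rfl

-- per-stage inserted (name, value) pairs agree
theorem bimStage (named_sets : List (String × List String)) (keys : List String) (k : Nat) :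
    (bimLvl named_sets keys k).map
        (fun e => (PySem.Str.join "_" e.1, PySem.List.sorted e.2.1 (fun x => x) false)) =
      (combosA (k + 1) keys).map
        (fun c => (PySem.Str.join "_" c, PySem.List.sorted (bimInter named_sets c) (fun x => x) false)) := by
  have h1 : (bimLvl named_sets keys k).map
      (fun e => (PySem.Str.join "_" e.1, PySem.List.sorted e.2.1 (fun x => x) false)) =
      (bimLvl named_sets keys k).map
      (fun e => (PySem.Str.join "_" e.1, PySem.List.sorted (bimInter named_sets e.1) (fun x => x) false)) := by
    refine List.map_congr_left (fun e he => ?_)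
    rw [(bimLvl_inter named_sets keys k e he).2]
  rw [h1, ← bimPL_fst, ← bimLvl_proj named_sets keys, List.map_map, List.map_map]
  rfl

-- the main loop: A's dict accumulator equals the first component of B's (dict, level) accumulator
theorem bimLoop (named_sets : List (String × List String)) (keys : List String) :
    ∀ (cnt : Nat) (a : Int), 2 ≤ a → ((keys.length : Int) + 1 - a).toNat = cnt →
      ∀ (d : PySem.Dict String (List String)) (lvl : List (List String × List String × List String)),
        lvl = bimLvl named_sets keys (a.toNat - 2) →
        (PySem.List.pyRange a ((keys.length : Int) + 1) 1).foldl (fun intersections (size : Int) =>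
            (combosA size.toNat keys).foldl (fun intersections combo =>
              PySem.Dict.insert intersections (PySem.Str.join "_" combo)
                (PySem.List.sorted (bimInter named_sets combo) (fun x => x) false))
            intersections) d =
        ((PySem.List.pyRange a ((keys.length : Int) + 1) 1).foldl
          (fun (st : PySem.Dict String (List String) × List (List String × List String × List String)) _size =>
            let nxt := st.2.flatMap (fun e => bimExpand named_sets e.1 e.2.1 e.2.2)
            (nxt.foldl (fun r e =>
              PySem.Dict.insert r (PySem.Str.join "_" e.1) (PySem.List.sorted e.2.1 (fun x => x) false)) st.1,
             nxt))
          (d, lvl)).1 := by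
  intro cnt
  induction cnt with
  | zero =>
    intro a ha hc d lvl _
    rw [PySem.List.pyRange_one_eq_nil (by omega)]
    rfl
  | succ cnt ih =>
    intro a ha hc d lvl hlvl
    rw [PySem.List.pyRange_one_cons (by omega)]
    simp only [List.foldl_cons]
    have hnxt : lvl.flatMap (fun e => bimExpand named_sets e.1 e.2.1 e.2.2) =
        bimLvl named_sets keys (a.toNat - 1) := by
      rw [hlvl, show a.toNat - 1 = (a.toNat - 2) + 1 by omega]
      rfl
    have hd : (combosA a.toNat keys).foldl (fun intersections combo =>
          PySem.Dict.insert intersections (PySem.Str.join "_" combo)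
            (PySem.List.sorted (bimInter named_sets combo) (fun x => x) false)) d =
        (lvl.flatMap (fun e => bimExpand named_sets e.1 e.2.1 e.2.2)).foldl (fun r e =>
          PySem.Dict.insert r (PySem.Str.join "_" e.1) (PySem.List.sorted e.2.1 (fun x => x) false)) d := by
      rw [hnxt]
      have eA := List.foldl_map
        (f := fun c => (PySem.Str.join "_" c, PySem.List.sorted (bimInter named_sets c) (fun x => x) false))
        (g := fun r (p : String × List String) => PySem.Dict.insert r p.1 p.2)
        (l := combosA a.toNat keys) (init := d)
      have eB := List.foldl_map
        (f := fun (e : List String × List String × List String) =>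
          (PySem.Str.join "_" e.1, PySem.List.sorted e.2.1 (fun x => x) false))
        (g := fun r (p : String × List String) => PySem.Dict.insert r p.1 p.2)
        (l := bimLvl named_sets keys (a.toNat - 1)) (init := d)
      rw [← eA, ← eB]
      rw [bimStage named_sets keys (a.toNat - 1), show a.toNat - 1 + 1 = a.toNat by omega]
    rw [hd]
    exact ih (a + 1) (by omega) (by omega) _ _ (by rw [hnxt]; congr 1; omega)

-- ===== VERDICT (by name: the statement is the Claim_ definition above) =====
theorem build_intersection_map_spec : Claim_equal_build_intersection_map := by
  intro named_sets _
  show build_intersection_map named_sets = build_intersection_map_alt named_sets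
  unfold build_intersection_map build_intersection_map_alt
  have hA : (fun (intersections : PySem.Dict String (List String)) (combo : List String) =>
      PySem.Dict.insert intersections (PySem.Str.join "_" combo)
        (PySem.List.sorted
          (match combo with
           | [] => []
           | c :: cs => cs.foldl (fun acc n => PySem.Set.inter acc (bimGet named_sets n)) (bimGet named_sets c))
          (fun x => x) false)) =
      (fun intersections combo =>
        PySem.Dict.insert intersections (PySem.Str.join "_" combo)
          (PySem.List.sorted (bimInter named_sets combo) (fun x => x) false)) := by
    funext intersections combo
    cases combo <;> rfl
  have := bimLoop named_sets (PySem.List.sorted (named_sets.map Prod.fst) (fun s => s) false)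
    (((PySem.List.sorted (named_sets.map Prod.fst) (fun s => s) false).length : Int) + 1 - 2).toNat 2
    (by omega) rfl PySem.Dict.empty
    (bimInit named_sets (PySem.List.sorted (named_sets.map Prod.fst) (fun s => s) false)) rfl
  simpa [hA] using congrArg PySem.Dict.items this
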